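-- pv_equiv track=rewrite | github.com/manaves/rosalind-problems | Armory/code/08_SUBO.py | count_hamming
-- ===== SOURCE A (Python) =====
-- def hamm(s1, s2):
--     """
--     Computes the Hamming distance between two strings of equal length.
--
--     Parameters:
--         s1 (str): the first string.
--         s2 (str): the second string.
--
--     Returns:
--         int: the Hamming distance between the two strings.
--     """
--
--     count = 0
--     for i in range(len(s1)):
--         if s1[i] != s2[i]:
--             count += 1
--
--     return count
--
-- def count_hamming(pattern, seq, dist=3):
--     """
--     Counts the number of occurrences of a pattern in a sequence with a given Hamming distance.
--
--     Parameters: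
--         pattern (str): the pattern to search for.
--         seq (str): the sequence in which to search for the pattern.
--         dist (int): the maximum allowed Hamming distance.
--
--     Returns:
--         int: the count of occurrences of the pattern in the sequence within the specified Hamming distance.
--     """
--
--     count = 0
--     np = len(pattern)
--     ns = len(seq)
--     # Iterate through the sequence to find occurrences of the pattern
--     for i in range(ns - np + 1):
--         if hamm(seq[i : i + np], pattern) <= dist:
--             count += 1
--
--     return count
-- ===== SOURCE B (Python) =====
-- def count_hamming(pattern, seq, dist=3):
--     """Count alignments of pattern in seq with Hamming distance <= dist.
--
--     Transposed 'scatter' formulation: instead of comparing each window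
--     against the pattern, walk the sequence once and, for each text position t,
--     credit one match to every alignment i = t - j (j clipped to the valid
--     alignment window) whose pattern character equals seq[t]; an alignment is
--     counted iff len(pattern) - matches[i] <= dist."""
--     m, n = len(pattern), len(seq)
--     if m > n:
--         return 0
--     n_align = n - m + 1
--     matches = [0] * n_align
--     for t in range(n):
--         c = seq[t]
--         lo = t - n_align + 1
--         if lo < 0:
--             lo = 0
--         hi = t if t < m - 1 else m - 1
--         for j in range(lo, hi + 1):
--             if pattern[j] == c:
--                 matches[t - j] += 1
--     return sum(1 for v in matches if m - v <= dist)
-- ===== Notes on version B (the rewrite author's own statement) =====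
-- stated objective: alternative
-- what changed: Replaces the window-by-window slice-and-compare scan (slice each window, call hamm, compare to dist) with a transposed single pass over the sequence that scatters per-alignment match counts into an array (for each text position, each clipped pattern offset whose character matches credits its alignment), counting alignments with len(pattern)-matches <= dist at the end.
import Mathlib
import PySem

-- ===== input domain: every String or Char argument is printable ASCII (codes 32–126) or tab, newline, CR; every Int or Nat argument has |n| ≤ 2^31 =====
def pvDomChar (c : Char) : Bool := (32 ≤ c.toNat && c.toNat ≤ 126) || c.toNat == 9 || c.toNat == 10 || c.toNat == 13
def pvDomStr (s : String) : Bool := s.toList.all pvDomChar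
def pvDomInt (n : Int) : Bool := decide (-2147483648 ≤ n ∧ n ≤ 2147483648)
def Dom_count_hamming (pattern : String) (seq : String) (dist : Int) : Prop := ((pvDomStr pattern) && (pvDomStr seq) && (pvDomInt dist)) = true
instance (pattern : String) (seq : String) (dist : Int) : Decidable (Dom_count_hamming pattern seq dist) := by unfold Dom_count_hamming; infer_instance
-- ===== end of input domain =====

-- B replaces A's window-by-window slice-and-compare scan with a transposed
-- single pass over the sequence that scatters per-alignment match counts into
-- an array (objective: alternative); return values proved equal on Dom.

-- ===== PORT A =====
-- helper hamm(s1, s2): in A's calls both strings have equal length, so both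
-- indexings are in range; xs[i] is ported with pyGetD (the default is never read)
def hamm (s1 s2 : List Char) : Int :=
  (PySem.List.pyRange 0 (s1.length : Int) 1).foldl
    (fun count i =>
      if PySem.List.pyGetD s1 i 'A' ≠ PySem.List.pyGetD s2 i 'A' then count + 1 else count) 0

def count_hamming (pattern : String) (seq : String) (dist : Int) : Int :=
  let p := pattern.toList
  let s := seq.toList
  let np : Int := p.length
  let ns : Int := s.length
  (PySem.List.pyRange 0 (ns - np + 1) 1).foldl
    (fun count i =>
      if hamm (PySem.List.slice s (some i) (some (i + np))) p ≤ dist then count + 1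
      else count) 0

-- ===== PORT B =====
-- one step of the inner loop "if pattern[j] == c: matches[t - j] += 1"
-- (no in-range guard: the range the caller builds keeps t - j inside matches)
def chStep (p : List Char) (c : Char) (t : Int) (ms : List Int) (j : Int) : List Int :=
  if PySem.List.pyGetD p j 'A' == c then
    PySem.List.pySetD ms (t - j) (PySem.List.pyGetD ms (t - j) 0 + 1)
  else ms

-- "for j in range(lo, hi + 1): ..."
def chInner (p : List Char) (c : Char) (t : Int) (ms : List Int) (js : List Int) : List Int :=
  js.foldl (chStep p c t) ms

-- one step of "for t in range(n)": c = seq[t]; lo/hi clip j to the valid alignments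
def chOuterStep (p : List Char) (s : List Char) (nAlign m : Int) (ms : List Int) (t : Int) : List Int :=
  let c := PySem.List.pyGetD s t 'A'
  let lo := if t - nAlign + 1 < 0 then 0 else t - nAlign + 1
  let hi := if t < m - 1 then t else m - 1
  chInner p c t ms (PySem.List.pyRange lo (hi + 1) 1)

-- matches = [0] * n_align, then the loop over range(n)
def chMatches (p : List Char) (s : List Char) (nAlign m : Int) : List Int :=
  (PySem.List.pyRange 0 (s.length : Int) 1).foldl (chOuterStep p s nAlign m)
    (List.replicate nAlign.toNat 0)

def count_hamming_alt (pattern : String) (seq : String) (dist : Int) : Int :=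
  let p := pattern.toList
  let s := seq.toList
  let m : Int := p.length
  let n : Int := s.length
  if m > n then 0
  else
    let nAlign := n - m + 1
    let ms := chMatches p s nAlign m
    ms.foldl (fun c v => if m - v ≤ dist then c + 1 else c) 0

-- ===== PRECONDITION & SPEC =====
def Spec_count_hamming (pattern : String) (seq : String) (dist : Int) (out : Int) : Prop := out = count_hamming_alt pattern seq dist
instance (pattern : String) (seq : String) (dist : Int) (out : Int) : Decidable (Spec_count_hamming pattern seq dist out) := by unfold Spec_count_hamming; infer_instance

-- ===== CLAIM (what is proved, stated in full; the proofs are below) =====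
def Claim_equal_count_hamming : Prop := ∀ (pattern : String) (seq : String) (dist : Int), Dom_count_hamming pattern seq dist → Spec_count_hamming pattern seq dist (count_hamming pattern seq dist)

-- ===== LEMMAS AND PROOFS =====

-- number of mismatches (A's view) and matches (B's view) of pattern p against s at alignment k
def mismB (p s : List Char) (k : Nat) : Nat :=
  (List.range p.length).countP (fun j => decide (s.getD (k+j) 'A' ≠ p.getD j 'A'))

def refMatch (p s : List Char) (k : Nat) : Nat :=
  (List.range p.length).countP (fun j => decide (p.getD j 'A' = s.getD (k + j) 'A'))

theorem hamm_eq (s1 s2 : List Char) :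
    hamm s1 s2 = ((List.range s1.length).countP
      (fun i => decide (s1.getD i 'A' ≠ s2.getD i 'A')) : Int) := by
  unfold hamm
  rw [PySem.List.pyRange_zero_nat, List.foldl_map,
      PySem.List.foldl_ite_add_one (fun i : Nat => PySem.List.pyGetD s1 (i:Int) 'A' ≠ PySem.List.pyGetD s2 (i:Int) 'A')]
  simp [PySem.List.pyGetD_natCast]

theorem window_getD (s : List Char) (k m j : Nat) (hk : k + m ≤ s.length) (hj : j < m) :
    ((s.drop k).take m).getD j 'A' = s.getD (k + j) 'A' := by
  have h1 : j < ((s.drop k).take m).length := by simp; omega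
  have h2 : k + j < s.length := by omega
  rw [List.getD_eq_getElem _ _ h1, List.getD_eq_getElem _ _ h2]
  simp [List.getElem_take, List.getElem_drop]

theorem countA (pattern seq : String) (dist : Int) :
    count_hamming pattern seq dist =
      ((List.range ((seq.toList.length : Int) - (pattern.toList.length : Int) + 1).toNat).countP
        (fun k => decide ((mismB pattern.toList seq.toList k : Int) ≤ dist)) : Int) := by
  set p := pattern.toList with hp
  set s := seq.toList with hs
  set m := p.length with hm
  set ns := s.length with hns
  show (PySem.List.pyRange 0 ((ns:Int) - m + 1) 1).foldl _ 0 = _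
  rw [PySem.List.pyRange_one, List.foldl_map,
      PySem.List.foldl_ite_add_one (fun k : Nat =>
        hamm (PySem.List.slice s (some ((0:Int) + k)) (some ((0:Int) + k + m))) p ≤ dist)]
  rw [zero_add, sub_zero]
  congr 1
  apply List.countP_congr
  intro k hk
  rw [List.mem_range] at hk
  have hkm : k + m ≤ ns := by omega
  have hsl : PySem.List.slice s (some ((0:Int) + k)) (some ((0:Int) + k + m)) = (s.drop k).take m := by
    rw [zero_add]
    exact_mod_cast PySem.List.slice_natCast_add s k m
  rw [hsl, hamm_eq]
  have hlen : ((s.drop k).take m).length = m := by simp; omega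
  rw [hlen]
  have : (List.range m).countP (fun i => decide (((s.drop k).take m).getD i 'A' ≠ p.getD i 'A'))
       = mismB p s k := by
    unfold mismB
    apply List.countP_congr
    intro j hj
    rw [List.mem_range] at hj
    rw [window_getD s k m j hkm hj]
  rw [this]

theorem chStep_length (p : List Char) (c : Char) (t : Int) (ms : List Int) (j : Int)
    (h : 0 ≤ t - j) : (chStep p c t ms j).length = ms.length := by
  unfold chStep
  split
  · rw [PySem.List.pySetD_of_nonneg _ _ h]
    simp
  · rfl

theorem chInner_length (p : List Char) (c : Char) (t : Int) (js : List Int) :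
    ∀ ms : List Int, (∀ j ∈ js, 0 ≤ t - j) → (chInner p c t ms js).length = ms.length := by
  induction js with
  | nil => intro ms _; rfl
  | cons j js ih =>
    intro ms hin
    show (chInner p c t (chStep p c t ms j) js).length = _
    rw [ih _ (fun x hx => hin x (List.mem_cons_of_mem _ hx)),
        chStep_length _ _ _ _ _ (hin j List.mem_cons_self)]

theorem chInner_getD (p : List Char) (c : Char) (t : Int) (js : List Int) :
    ∀ (ms : List Int) (k : Nat), k < ms.length →
    (∀ j ∈ js, 0 ≤ t - j ∧ t - j < (ms.length : Int)) →
    (chInner p c t ms js).getD k 0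
      = ms.getD k 0 + (js.countP (fun j => (PySem.List.pyGetD p j 'A' == c) && decide (j = t - (k:Int))) : Int) := by
  induction js with
  | nil => intro ms k hk _; simp [chInner]
  | cons j js ih =>
    intro ms k hk hin
    have hj0 := (hin j List.mem_cons_self).1
    have hjA := (hin j List.mem_cons_self).2
    show (chInner p c t (chStep p c t ms j) js).getD k 0 = _
    rw [List.countP_cons,
        ih (chStep p c t ms j) k (by rw [chStep_length _ _ _ _ _ hj0]; exact hk)
          (by rw [chStep_length _ _ _ _ _ hj0]
              exact fun x hx => hin x (List.mem_cons_of_mem _ hx))]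
    have hmain : (chStep p c t ms j).getD k 0
        = ms.getD k 0 + if ((PySem.List.pyGetD p j 'A' == c) && decide (j = t - (k:Int))) = true then 1 else 0 := by
      unfold chStep
      by_cases hc : PySem.List.pyGetD p j 'A' == c
      · rw [if_pos hc]
        by_cases hj : j = t - (k:Int)
        · have htj : (t - j) = ((k:Nat) : Int) := by omega
          rw [htj, PySem.List.pySetD_natCast, PySem.List.pyGetD_natCast]
          rw [List.getD_eq_getElem _ _ (by simpa using hk)]
          rw [List.getElem_set_self]
          rw [List.getD_eq_getElem _ _ hk]
          have hc' := hc
          rw [hj] at hc'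
          simp [hc', hj]
        · rw [PySem.List.pySetD_of_nonneg _ _ hj0]
          have hne : (t - j).toNat ≠ k := by omega
          rw [List.getD_eq_getElem _ _ (by simpa using hk), List.getD_eq_getElem _ _ hk]
          simp [hne, hc, hj]
      · rw [if_neg (by simpa using hc)]
        simp [hc]
    rw [hmain]
    by_cases hcj : ((PySem.List.pyGetD p j 'A' == c) && decide (j = t - (k:Int))) = true
    · simp only [hcj, if_true]
      push_cast
      ring
    · simp only [hcj, Bool.false_eq_true, if_false]
      push_cast
      ring

theorem countP_eq_ite_mem (q : Int → Bool) (v : Int) :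
    ∀ l : List Int, l.Nodup →
    l.countP (fun j => q j && decide (j = v)) = if v ∈ l ∧ q v = true then 1 else 0 := by
  intro l
  induction l with
  | nil => intro _; simp
  | cons a l ih =>
    intro hnd
    rw [List.countP_cons]
    rcases List.nodup_cons.1 hnd with ⟨hna, hndl⟩
    by_cases hv : a = v
    · subst hv
      have h0 : l.countP (fun j => q j && decide (j = a)) = 0 := by
        apply List.countP_eq_zero.2
        intro x hx
        simp only [Bool.and_eq_true, decide_eq_true_eq, not_and]
        intro _ hxa
        exact absurd (hxa ▸ hx) hna
      rw [h0]
      by_cases hq : q a = true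
      · simp [hq]
      · simp [hq]
    · rw [ih hndl]
      have hz : (q a && decide (a = v)) = false := by simp [hv]
      rw [hz]
      have hiff : (v ∈ l ∧ q v = true) ↔ (v ∈ a :: l ∧ q v = true) := by
        constructor
        · rintro ⟨hmem, hqv⟩
          exact ⟨List.mem_cons_of_mem _ hmem, hqv⟩
        · rintro ⟨hmem, hqv⟩
          rcases List.mem_cons.1 hmem with h | h
          · exact absurd h.symm hv
          · exact ⟨h, hqv⟩
      simp only [Bool.false_eq_true, if_false, add_zero]
      exact if_congr hiff rfl rfl

theorem chOuter_getD (p s : List Char) (nA m : Int) (hm : m = (p.length : Int)) (ts : List Int) :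
    ∀ (ms : List Int) (k : Nat), k < ms.length → nA = (ms.length : Int) →
    (ts.foldl (chOuterStep p s nA m) ms).getD k 0
      = ms.getD k 0 + (ts.map (fun t =>
          ((PySem.List.pyRange (if t - nA + 1 < 0 then 0 else t - nA + 1) ((if t < m - 1 then t else m - 1) + 1) 1).countP
            (fun j => (PySem.List.pyGetD p j 'A' == PySem.List.pyGetD s t 'A') && decide (j = t - (k:Int))) : Int))).sum := by
  induction ts with
  | nil => intro ms k hk hnA; simp
  | cons t ts ih =>
    intro ms k hk hnA
    rw [List.foldl_cons, List.map_cons, List.sum_cons]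
    have hbound : ∀ j ∈ PySem.List.pyRange (if t - nA + 1 < 0 then 0 else t - nA + 1) ((if t < m - 1 then t else m - 1) + 1) 1,
        0 ≤ t - j ∧ t - j < (ms.length : Int) := by
      intro j hj
      rw [PySem.List.mem_pyRange_one] at hj
      rw [← hnA]
      constructor
      · rcases hj with ⟨_, hj2⟩
        split at hj2 <;> omega
      · rcases hj with ⟨hj1, _⟩
        split at hj1 <;> omega
    have hstep : chOuterStep p s nA m ms t
        = chInner p (PySem.List.pyGetD s t 'A') t ms
            (PySem.List.pyRange (if t - nA + 1 < 0 then 0 else t - nA + 1) ((if t < m - 1 then t else m - 1) + 1) 1) := rfl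
    rw [hstep, ih _ k
        (by rw [chInner_length _ _ _ _ _ (fun j hj => (hbound j hj).1)]; exact hk)
        (by rw [chInner_length _ _ _ _ _ (fun j hj => (hbound j hj).1)]; exact hnA),
      chInner_getD p _ t _ ms k hk hbound]
    ring

theorem chOuter_length (p s : List Char) (nA m : Int) (ts : List Int) :
    ∀ ms : List Int, (ts.foldl (chOuterStep p s nA m) ms).length = ms.length := by
  induction ts with
  | nil => intro ms; rfl
  | cons t ts ih =>
    intro ms
    rw [List.foldl_cons, ih]
    show (chInner _ _ _ _ (PySem.List.pyRange _ _ 1)).length = _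
    apply chInner_length
    intro j hj
    rw [PySem.List.mem_pyRange_one] at hj
    rcases hj with ⟨hj1, hj2⟩
    split at hj2 <;> omega

theorem chMatches_length (p s : List Char) (nA m : Int) :
    (chMatches p s nA m).length = nA.toNat := by
  rw [chMatches, chOuter_length, List.length_replicate]

theorem reindex (p s : List Char) (k : Nat) (h : k + p.length ≤ s.length) :
    (List.range s.length).countP (fun (t : Nat) => decide (0 ≤ (t:Int) - (k:Int) ∧ (t:Int) - (k:Int) < 0 + (p.length:Int) ∧ p.getD ((t:Int) - (k:Int) - 0).toNat 'A' = s.getD t 'A'))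
      = refMatch p s k := by
  set m := p.length with hm
  have hn : s.length = k + (m + (s.length - k - m)) := by omega
  rw [hn, List.range_add, List.countP_append, List.range_add, List.map_append, List.countP_append]
  simp only [List.countP_map, Function.comp_def]
  have h1 : (List.range k).countP (fun (t : Nat) => decide (0 ≤ (t:Int) - (k:Int) ∧ (t:Int) - (k:Int) < 0 + (m:Int) ∧ p.getD ((t:Int) - (k:Int) - 0).toNat 'A' = s.getD t 'A')) = 0 := by
    apply List.countP_eq_zero.2
    intro t ht
    rw [List.mem_range] at ht
    simp only [decide_eq_true_eq]
    intro hc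
    omega
  have h3 : (List.range (s.length - k - m)).countP
      (fun (u : Nat) => decide (0 ≤ ((k + (m + u) : Nat):Int) - (k:Int) ∧ ((k + (m + u) : Nat):Int) - (k:Int) < 0 + (m:Int) ∧ p.getD (((k + (m + u) : Nat):Int) - (k:Int) - 0).toNat 'A' = s.getD (k + (m + u)) 'A')) = 0 := by
    apply List.countP_eq_zero.2
    intro u hu
    simp only [decide_eq_true_eq]
    intro hc
    have := hc.2.1
    push_cast at this
    omega
  have h2 : (List.range m).countP
      (fun (j : Nat) => decide (0 ≤ ((k + j : Nat):Int) - (k:Int) ∧ ((k + j : Nat):Int) - (k:Int) < 0 + (m:Int) ∧ p.getD (((k + j : Nat):Int) - (k:Int) - 0).toNat 'A' = s.getD (k + j) 'A'))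
      = (List.range m).countP (fun j => decide (p.getD j 'A' = s.getD (k + j) 'A')) := by
    apply List.countP_congr
    intro j hj
    rw [List.mem_range] at hj
    simp only [decide_eq_true_eq]
    constructor
    · intro hc
      have hidx : ((k + j : Nat) : Int) - (k:Int) - 0 = (j : Int) := by push_cast; ring
      rw [hidx] at hc
      simpa using hc.2.2
    · intro hc
      refine ⟨by push_cast; omega, by push_cast; omega, ?_⟩
      have hidx : ((k + j : Nat) : Int) - (k:Int) - 0 = (j : Int) := by push_cast; ring
      rw [hidx]
      simpa using hc
  rw [h1, h3, h2, refMatch, ← hm]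
  omega

theorem chMatches_getD (p s : List Char) (nA : Int) (hnA : nA = (s.length : Int) - (p.length : Int) + 1)
    (hmn : p.length ≤ s.length) (k : Nat) (hk : k < nA.toNat) :
    (chMatches p s nA (p.length : Int)).getD k 0 = (refMatch p s k : Int) := by
  have hNpos : (0:Int) ≤ nA := by omega
  have hlen : (List.replicate nA.toNat (0:Int)).length = nA.toNat := List.length_replicate
  rw [chMatches, chOuter_getD p s nA _ rfl _ _ k (by rw [hlen]; exact hk) (by rw [hlen]; omega)]
  rw [List.getD_eq_getElem _ _ (by rw [hlen]; exact hk), List.getElem_replicate, zero_add]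
  rw [PySem.List.pyRange_zero_nat, List.map_map]
  have hterm : ∀ t ∈ List.range s.length,
      (((fun t : Int =>
        ((PySem.List.pyRange (if t - nA + 1 < 0 then 0 else t - nA + 1) ((if t < (p.length:Int) - 1 then t else (p.length:Int) - 1) + 1) 1).countP
          (fun j => (PySem.List.pyGetD p j 'A' == PySem.List.pyGetD s t 'A') && decide (j = t - (k:Int))) : Int))
        ∘ (fun k : Nat => (k : Int))) t)
      = (if (fun (t : Nat) => decide (0 ≤ (t:Int) - (k:Int) ∧ (t:Int) - (k:Int) < 0 + (p.length:Int) ∧ p.getD ((t:Int) - (k:Int) - 0).toNat 'A' = s.getD t 'A')) t = true then (1:Int) else 0) := by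
    intro t ht
    rw [List.mem_range] at ht
    simp only [Function.comp_apply]
    rw [countP_eq_ite_mem _ _ _ (PySem.List.nodup_pyRange_one _ _)]
    have hmem : ((t:Int) - (k:Int)) ∈ PySem.List.pyRange (if (t:Int) - nA + 1 < 0 then 0 else (t:Int) - nA + 1) ((if (t:Int) < (p.length:Int) - 1 then (t:Int) else (p.length:Int) - 1) + 1) 1
        ↔ (0 ≤ (t:Int) - (k:Int) ∧ (t:Int) - (k:Int) < (p.length:Int)) := by
      rw [PySem.List.mem_pyRange_one]
      constructor
      · rintro ⟨h1, h2⟩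
        constructor
        · split at h1 <;> omega
        · split at h2 <;> omega
      · rintro ⟨h1, h2⟩
        constructor
        · split <;> omega
        · split <;> omega
    by_cases hP : 0 ≤ (t:Int) - (k:Int) ∧ (t:Int) - (k:Int) < 0 + (p.length:Int) ∧ p.getD ((t:Int) - (k:Int) - 0).toNat 'A' = s.getD t 'A'
    · rw [if_pos ⟨hmem.2 ⟨hP.1, by have := hP.2.1; omega⟩, by
          have h0 : PySem.List.pyGetD p ((t:Int) - (k:Int)) 'A' = p.getD ((t:Int) - (k:Int)).toNat 'A' := by
            rw [PySem.List.pyGetD_of_nonneg _ _ hP.1]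
          have h1 : PySem.List.pyGetD s ((t:Nat):Int) 'A' = s.getD t 'A' := PySem.List.pyGetD_natCast s t 'A'
          rw [h0, h1]
          have := hP.2.2
          simp only [sub_zero] at this
          have e1 : ((t:Int) - (k:Int)).toNat = t - k := by omega
          rw [e1] at this
          simp only [beq_iff_eq, e1]
          exact this⟩]
      rw [if_pos (decide_eq_true hP)]
      simp
    · rw [if_neg (by
          rintro ⟨hmem', hq⟩
          apply hP
          have hv := hmem.1 hmem'
          refine ⟨hv.1, by omega, ?_⟩
          have h0 : PySem.List.pyGetD p ((t:Int) - (k:Int)) 'A' = p.getD ((t:Int) - (k:Int)).toNat 'A' := by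
            rw [PySem.List.pyGetD_of_nonneg _ _ hv.1]
          have h1 : PySem.List.pyGetD s ((t:Nat):Int) 'A' = s.getD t 'A' := PySem.List.pyGetD_natCast s t 'A'
          rw [h0, h1] at hq
          simp only [sub_zero]
          simpa using hq)]
      rw [if_neg (fun h => hP (of_decide_eq_true h))]
      simp
  rw [List.map_congr_left hterm, PySem.List.sum_map_ite_one_zero]
  have hkm : k + p.length ≤ s.length := by omega
  rw [reindex p s k hkm]

theorem chMatches_eq_map (p s : List Char) (nA : Int) (hnA : nA = (s.length : Int) - (p.length : Int) + 1)
    (hmn : p.length ≤ s.length) :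
    chMatches p s nA (p.length : Int) = (List.range nA.toNat).map (fun k => (refMatch p s k : Int)) := by
  apply List.ext_getElem
  · rw [chMatches_length, List.length_map, List.length_range]
  · intro i h1 h2
    rw [List.getElem_map, List.getElem_range]
    rw [← List.getD_eq_getElem _ 0 h1]
    exact chMatches_getD p s nA hnA hmn i (by rw [chMatches_length] at h1; exact h1)

theorem mism_add_match (p s : List Char) (k : Nat) :
    mismB p s k + refMatch p s k = p.length := by
  rw [mismB, refMatch]
  have h := List.length_eq_countP_add_countP (l := List.range p.length)
    (fun j => decide (s.getD (k+j) 'A' ≠ p.getD j 'A'))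
  rw [List.length_range] at h
  have heq : (List.range p.length).countP (fun a => decide ¬decide (s.getD (k + a) 'A' ≠ p.getD a 'A') = true)
      = (List.range p.length).countP (fun j => decide (p.getD j 'A' = s.getD (k + j) 'A')) := by
    apply List.countP_congr
    intro j _
    simp only [decide_eq_true_eq, ne_eq, decide_not, Bool.not_eq_true', decide_eq_false_iff_not, not_not]
    exact eq_comm
  omega

-- B's value as the same countP
theorem countB (pattern seq : String) (dist : Int) :
    count_hamming_alt pattern seq dist
      = ((List.range (((seq.toList.length : Int) - (pattern.toList.length : Int) + 1).toNat)).countP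
          (fun k => decide ((pattern.toList.length : Int) - (refMatch pattern.toList seq.toList k : Int) ≤ dist)) : Int) := by
  set p := pattern.toList with hp
  set s := seq.toList with hs
  by_cases h : (p.length : Int) > (s.length : Int)
  · show (if (p.length : Int) > (s.length : Int) then (0:Int) else _) = _
    rw [if_pos h]
    have h0 : ((s.length : Int) - (p.length : Int) + 1).toNat = 0 := by omega
    rw [h0]
    simp
  · show (if (p.length : Int) > (s.length : Int) then (0:Int) else _) = _
    rw [if_neg h]
    rw [PySem.List.foldl_ite_add_one (fun v : Int => (p.length : Int) - v ≤ dist)]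
    rw [chMatches_eq_map p s _ rfl (by omega)]
    rw [List.countP_map]
    simp only [Function.comp_def, zero_add]

theorem a_eq_b (pattern seq : String) (dist : Int) :
    count_hamming pattern seq dist = count_hamming_alt pattern seq dist := by
  rw [countA, countB]
  congr 1
  apply List.countP_congr
  intro k _
  have hmm := mism_add_match pattern.toList seq.toList k
  simp only [decide_eq_true_eq]
  constructor
  · intro hle
    omega
  · intro hle
    omega

-- ===== VERDICT (by name: the statement is the Claim_ definition above) =====
theorem count_hamming_spec : Claim_equal_count_hamming := by
  intro pattern seq dist _
  unfold Spec_count_hamming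
  exact a_eq_b pattern seq dist
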